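-- pv_equiv track=rewrite | github.com/moffy-Black/atcoder | sumitrust2019/d/main.py | check_part_arr
-- ===== SOURCE A (Python) =====
-- def check_part_arr(S, i, j, k):
--     search = [i, j, k];key=0
--     for i in range(len(S)):
--         if S[i] == search[key]:
--             key+=1
--             if key == 3:
--                 return True
--     return False
-- ===== SOURCE B (Python) =====
-- def check_part_arr(S, i, j, k):
--     # Scan S from the RIGHT, consuming the targets in reverse order (k, then j,
--     # then i) at their rightmost possible positions; a subsequence exists in
--     # forward order iff it exists in this reversed reading.
--     rest = [k, j, i]
--     for x in reversed(S):
--         if rest and x == rest[0]: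
--             rest.pop(0)
--     return not rest
-- ===== Notes on version B (the rewrite author's own statement) =====
-- stated objective: alternative
-- what changed: Replaces A's forward indexed scan matching i,j,k at leftmost positions by a backward scan over reversed(S) that consumes the reversed target list [k,j,i] at rightmost positions, using the reversal-symmetry of subsequence existence.
import Mathlib
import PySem

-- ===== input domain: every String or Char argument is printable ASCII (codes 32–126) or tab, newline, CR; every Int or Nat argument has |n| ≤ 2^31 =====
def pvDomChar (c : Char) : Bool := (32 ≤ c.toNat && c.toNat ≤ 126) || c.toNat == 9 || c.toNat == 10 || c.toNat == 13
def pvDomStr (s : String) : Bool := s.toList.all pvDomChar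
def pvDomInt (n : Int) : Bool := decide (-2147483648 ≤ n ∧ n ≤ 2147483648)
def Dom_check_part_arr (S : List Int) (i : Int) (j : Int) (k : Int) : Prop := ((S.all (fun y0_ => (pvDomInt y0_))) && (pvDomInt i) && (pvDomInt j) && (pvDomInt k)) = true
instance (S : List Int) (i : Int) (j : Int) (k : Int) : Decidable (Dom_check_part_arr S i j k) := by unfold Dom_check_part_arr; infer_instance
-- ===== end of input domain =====

-- B scans S backwards, consuming the reversed target list [k,j,i] at rightmost positions
-- (alternative traversal order; subsequence existence is reversal-symmetric; same cost).

-- ===== PORT A =====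
-- A's loop over range(len(S)) with mutable 'key', transcribed as structural recursion carrying 'key';
-- 'search[key]' is PySem.List.pyGet? (key is 0..2 here, always in range).
def check_part_arr_goA (search : List Int) : List Int → Nat → Bool
  | [], _ => false
  | x :: rest, key =>
    if PySem.List.pyGet? search (Int.ofNat key) = some x then
      if key + 1 = 3 then true else check_part_arr_goA search rest (key + 1)
    else check_part_arr_goA search rest key

def check_part_arr (S : List Int) (i : Int) (j : Int) (k : Int) : Bool :=
  check_part_arr_goA [i, j, k] S 0

-- ===== PORT B =====
-- the 'for x in reversed(S)' loop: carry the remaining target list 'rest' over S.reverse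
def check_part_arr_goB : List Int → List Int → List Int
  | rest, [] => rest
  | rest, x :: l => check_part_arr_goB (if rest.head? = some x then rest.tail else rest) l

def check_part_arr_alt (S : List Int) (i : Int) (j : Int) (k : Int) : Bool :=
  (check_part_arr_goB [k, j, i] S.reverse).isEmpty

-- ===== PRECONDITION & SPEC =====
def Spec_check_part_arr (S : List Int) (i : Int) (j : Int) (k : Int) (out : Bool) : Prop := out = check_part_arr_alt S i j k
instance (S : List Int) (i : Int) (j : Int) (k : Int) (out : Bool) : Decidable (Spec_check_part_arr S i j k out) := by unfold Spec_check_part_arr; infer_instance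

-- ===== CLAIM (what is proved, stated in full; the proofs are below) =====
def Claim_equal_check_part_arr : Prop := ∀ (S : List Int) (i : Int) (j : Int) (k : Int), Dom_check_part_arr S i j k → Spec_check_part_arr S i j k (check_part_arr S i j k)

-- ===== LEMMAS AND PROOFS =====

-- reference greedy matcher, used only in the proofs
def pvFwd : List Int → List Int → Bool
  | [], _ => true
  | _ :: _, [] => false
  | a :: p, x :: l => if x = a then pvFwd p l else pvFwd (a :: p) l

theorem pvFwd_iff : ∀ (l p : List Int), pvFwd p l = true ↔ List.Sublist p l := by
  intro l
  induction l with
  | nil =>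
    intro p; cases p <;> simp [pvFwd]
  | cons x l ih =>
    intro p
    cases p with
    | nil => simp [pvFwd]
    | cons a p =>
      simp only [pvFwd]
      by_cases h : x = a
      · subst h
        simp [ih, List.cons_sublist_cons]
      · simp only [if_neg h, ih]
        constructor
        · intro hs; exact hs.cons x
        · intro hs
          cases hs with
          | cons _ hs => exact hs
          | cons₂ _ hs => exact absurd rfl h

theorem goA_two (i j k : Int) : ∀ (S : List Int),
    check_part_arr_goA [i, j, k] S 2 = pvFwd [k] S := by
  intro S
  induction S with
  | nil => rfl
  | cons x rest ih =>
    simp only [check_part_arr_goA, pvFwd, PySem.List.pyGet?, PySem.List.pyIdx?]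
    by_cases h : k = x <;> simp [h, eq_comm, ih]

theorem goA_one (i j k : Int) : ∀ (S : List Int),
    check_part_arr_goA [i, j, k] S 1 = pvFwd [j, k] S := by
  intro S
  induction S with
  | nil => rfl
  | cons x rest ih =>
    simp only [check_part_arr_goA, pvFwd, PySem.List.pyGet?, PySem.List.pyIdx?]
    by_cases h : j = x
    · subst h; simp [goA_two i j k rest]
    · simp [h, eq_comm, ih]

theorem goA_zero (i j k : Int) : ∀ (S : List Int),
    check_part_arr_goA [i, j, k] S 0 = pvFwd [i, j, k] S := by
  intro S
  induction S with
  | nil => rfl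
  | cons x rest ih =>
    simp only [check_part_arr_goA, pvFwd, PySem.List.pyGet?, PySem.List.pyIdx?]
    by_cases h : i = x
    · subst h; simp [goA_one i j k rest]
    · simp [h, eq_comm, ih]

theorem goB_isEmpty : ∀ (l p : List Int),
    (check_part_arr_goB p l).isEmpty = pvFwd p l := by
  intro l
  induction l with
  | nil => intro p; cases p <;> rfl
  | cons x l ih =>
    intro p
    cases p with
    | nil =>
      have hstep : check_part_arr_goB [] (x :: l) = check_part_arr_goB [] l := by
        simp [check_part_arr_goB]
      rw [hstep, ih []]; cases l <;> rfl
    | cons a p =>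
      simp only [check_part_arr_goB, pvFwd, List.head?]
      by_cases h : x = a
      · subst h; simp [ih]
      · rw [if_neg (fun hh => h (Option.some.inj hh).symm), if_neg h]
        exact ih (a :: p)

-- ===== VERDICT (by name: the statement is the Claim_ definition above) =====
theorem check_part_arr_spec : Claim_equal_check_part_arr := by
  intro S i j k _
  unfold Spec_check_part_arr check_part_arr check_part_arr_alt
  rw [goA_zero, goB_isEmpty]
  rw [Bool.eq_iff_iff, pvFwd_iff, pvFwd_iff]
  constructor
  · intro hs
    simpa using hs.reverse
  · intro hs
    simpa using hs.reverse
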